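-- pv_equiv track=rewrite | github.com/brocade/pyfos | pyfos/pyfos_rest_util.py | ignoreclifilters
-- ===== SOURCE A (Python) =====
-- def ignoreclifilters(filters, key):
--     usagefilterdict = dict()
--     testcondition = list()
--     usagefilterdict.update(dict({"ignoreMandatory" : list(["ipaddr", "login", "password"])}))
--     usagefilterdict.update(dict({"ignoreMandatoryNonIP": list(["login", "password"])}))
--     selectivecheck = [item for item in filters if item in usagefilterdict.keys()]
--     if len(selectivecheck):
--         testcondition = [item for item in selectivecheck if key in usagefilterdict[item]]
--     return bool(len(testcondition))
-- ===== SOURCE B (Python) =====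
-- def ignoreclifilters(filters, key):
--     return (("ignoreMandatory" in filters and key in ("ipaddr", "login", "password"))
--             or ("ignoreMandatoryNonIP" in filters and key in ("login", "password")))
-- ===== Notes on version B (the rewrite author's own statement) =====
-- stated objective: simpler
-- what changed: Replaced the dict table and the two filtering list comprehensions with a single flat boolean expression spelling out the two filter cases; no per-call dict/list construction.
import Mathlib
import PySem

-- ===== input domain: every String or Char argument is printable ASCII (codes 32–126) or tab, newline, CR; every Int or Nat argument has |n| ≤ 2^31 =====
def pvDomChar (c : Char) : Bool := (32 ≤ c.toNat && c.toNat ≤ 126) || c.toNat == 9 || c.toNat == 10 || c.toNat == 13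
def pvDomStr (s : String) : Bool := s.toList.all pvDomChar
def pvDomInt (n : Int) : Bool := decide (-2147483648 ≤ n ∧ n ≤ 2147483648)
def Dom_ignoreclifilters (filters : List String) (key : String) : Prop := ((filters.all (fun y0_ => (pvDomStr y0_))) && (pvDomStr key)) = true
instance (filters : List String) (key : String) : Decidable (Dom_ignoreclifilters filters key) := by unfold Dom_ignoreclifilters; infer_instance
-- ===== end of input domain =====

-- B replaces A's dict table and two filtering comprehensions with one flat boolean expression (objective: simpler).

-- ===== PORT A =====
def ignoreclifilters (filters : List String) (key : String) : Bool :=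
  let usagefilterdict : PySem.Dict String (List String) := PySem.Dict.empty
  let testcondition : List String := []
  let usagefilterdict := usagefilterdict.insert "ignoreMandatory" ["ipaddr", "login", "password"]
  let usagefilterdict := usagefilterdict.insert "ignoreMandatoryNonIP" ["login", "password"]
  let selectivecheck := filters.filter (fun item => usagefilterdict.keys.contains item)
  let testcondition :=
    if selectivecheck.length ≠ 0 then
      selectivecheck.filter (fun item => (usagefilterdict.getD item []).contains key)
    else testcondition
  decide (testcondition.length ≠ 0)

-- ===== PORT B =====
def ignoreclifilters_alt (filters : List String) (key : String) : Bool :=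
  (filters.contains "ignoreMandatory" && (key == "ipaddr" || key == "login" || key == "password"))
  || (filters.contains "ignoreMandatoryNonIP" && (key == "login" || key == "password"))

-- ===== PRECONDITION & SPEC =====
def Spec_ignoreclifilters (filters : List String) (key : String) (out : Bool) : Prop := out = ignoreclifilters_alt filters key
instance (filters : List String) (key : String) (out : Bool) : Decidable (Spec_ignoreclifilters filters key out) := by unfold Spec_ignoreclifilters; infer_instance

-- ===== CLAIM (what is proved, stated in full; the proofs are below) =====
def Claim_equal_ignoreclifilters : Prop := ∀ (filters : List String) (key : String), Dom_ignoreclifilters filters key → Spec_ignoreclifilters filters key (ignoreclifilters filters key)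

-- ===== LEMMAS AND PROOFS =====
theorem pv_if_filter (l : List String) (p : String → Bool) :
    (if l.length ≠ 0 then l.filter p else ([] : List String)) = l.filter p := by
  cases l <;> simp

theorem pv_len_ne_any (l : List String) (p : String → Bool) :
    decide ((l.filter p).length ≠ 0) = l.any p := by
  induction l with
  | nil => rfl
  | cons x xs ih => by_cases h : p x <;> simp_all

-- pointwise: the combined filter predicate of A equals B's per-key test
theorem pv_pred (key a : String) :
    ((((PySem.Dict.empty.insert "ignoreMandatory" ["ipaddr", "login", "password"]).insert
          "ignoreMandatoryNonIP" ["login", "password"]).getD a []).contains key &&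
      ((PySem.Dict.empty.insert "ignoreMandatory" ["ipaddr", "login", "password"]).insert
          "ignoreMandatoryNonIP" ["login", "password"]).keys.contains a)
    = ("ignoreMandatory" == a && (key == "ipaddr" || key == "login" || key == "password")
        || "ignoreMandatoryNonIP" == a && (key == "login" || key == "password")) := by
  by_cases h1 : "ignoreMandatory" = a
  · by_cases h2 : "ignoreMandatoryNonIP" = a
    · rw [← h1] at h2; exact absurd h2 (by decide)
    · subst h1
      simp [PySem.Dict.getD, PySem.Dict.get?, PySem.Dict.insert, PySem.Dict.empty,
        PySem.Dict.keys]
      rw [Bool.eq_iff_iff]; simp [or_assoc]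
  · by_cases h2 : "ignoreMandatoryNonIP" = a
    · subst h2
      simp [PySem.Dict.getD, PySem.Dict.get?, PySem.Dict.insert, PySem.Dict.empty,
        PySem.Dict.keys]
      rw [Bool.eq_iff_iff]; simp
    · rw [show ("ignoreMandatory" == a) = false from by simp [h1],
          show ("ignoreMandatoryNonIP" == a) = false from by simp [h2]]
      simp [PySem.Dict.getD, PySem.Dict.get?, PySem.Dict.insert, PySem.Dict.empty,
        PySem.Dict.keys, Ne.symm h1, Ne.symm h2]

theorem pv_any_split (l : List String) (a b : String) (K1 K2 : Bool) :
    (l.any fun f => a == f && K1 || b == f && K2)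
      = (l.contains a && K1 || l.contains b && K2) := by
  induction l with
  | nil => simp
  | cons x xs ih =>
    simp only [List.any_cons, List.contains_cons, ih]
    cases h1 : a == x <;> cases h2 : b == x <;> cases K1 <;> cases K2 <;>
      cases xs.contains a <;> cases xs.contains b <;> simp

theorem ignoreclifilters_eq_alt (filters : List String) (key : String) :
    ignoreclifilters filters key = ignoreclifilters_alt filters key := by
  unfold ignoreclifilters
  dsimp only
  rw [pv_if_filter, List.filter_filter, pv_len_ne_any]
  simp only [pv_pred]
  rw [pv_any_split]
  rfl

-- ===== VERDICT (by name: the statement is the Claim_ definition above) =====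
theorem ignoreclifilters_spec : Claim_equal_ignoreclifilters := by
  intro filters key _
  unfold Spec_ignoreclifilters
  exact ignoreclifilters_eq_alt filters key
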